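-- pv_equiv track=rewrite | github.com/HMSTerror/RDT | genrec/tokenization/semantic_ids.py | infer_vocab_sizes
-- ===== SOURCE A (Python) =====
-- def infer_vocab_sizes(item_to_code: dict[str, list[int]]) -> list[int]:
--     iterator = iter(item_to_code.values())
--     try:
--         first = next(iterator)
--     except StopIteration as exc:
--         raise ValueError("item_to_code is empty.") from exc
--
--     code_len = len(first)
--     maxima = [int(value) for value in first]
--     for code in iterator:
--         if len(code) != code_len:
--             raise ValueError("Inconsistent semantic code length across items.")
--         for idx, value in enumerate(code):
--             maxima[idx] = max(maxima[idx], int(value))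
--     return [value + 1 for value in maxima]
-- ===== SOURCE B (Python) =====
-- def infer_vocab_sizes(item_to_code: dict[str, list[int]]) -> list[int]:
--     values = list(item_to_code.values())
--     if not values:
--         raise ValueError("item_to_code is empty.")
--     code_len = len(values[0])
--     if any(len(code) != code_len for code in values):
--         raise ValueError("Inconsistent semantic code length across items.")
--     return [max(int(code[i]) for code in values) + 1 for i in range(code_len)]
-- ===== Notes on version B (the rewrite author's own statement) =====
-- stated objective: idiomatic
-- what changed: B validates the code lengths up front and then computes each output entry column-wise (built-in max over position i of all codes, plus 1), instead of A's row-major pass maintaining a running maxima vector with per-element list writes.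
import Mathlib
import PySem

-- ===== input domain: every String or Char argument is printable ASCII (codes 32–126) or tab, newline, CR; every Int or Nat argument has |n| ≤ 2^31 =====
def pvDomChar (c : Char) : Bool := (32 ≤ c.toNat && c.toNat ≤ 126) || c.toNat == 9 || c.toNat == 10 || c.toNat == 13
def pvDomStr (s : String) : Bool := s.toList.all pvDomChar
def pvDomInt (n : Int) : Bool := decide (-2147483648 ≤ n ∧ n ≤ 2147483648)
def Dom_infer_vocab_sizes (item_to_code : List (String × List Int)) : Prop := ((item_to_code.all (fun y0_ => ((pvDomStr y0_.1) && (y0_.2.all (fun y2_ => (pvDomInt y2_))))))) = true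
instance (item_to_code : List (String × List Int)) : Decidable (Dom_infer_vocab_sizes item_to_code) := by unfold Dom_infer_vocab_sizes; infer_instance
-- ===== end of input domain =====

-- B validates lengths up front and computes the result column-wise instead of A's running row-major maxima vector.

-- ===== PORT A =====
-- inner loop 'for idx, value in enumerate(code): maxima[idx] = max(maxima[idx], int(value))'
-- as the obvious structural recursion over the maxima state (exact when len(code) = len(maxima),
-- which Pre_ guarantees for every code reaching this loop)
def pvUpdMax : List Int → List Int → List Int
  | m, [] => m
  | [], _ :: _ => []
  | a :: m, v :: c => max a v :: pvUpdMax m c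

def infer_vocab_sizes (item_to_code : List (String × List Int)) : List Int :=
  match (PySem.Dict.ofList item_to_code).values with
  | [] => []          -- Python: raise ValueError("item_to_code is empty."); excluded by Pre_
  | first :: rest =>
    let code_len : Int := first.length
    let maxima := rest.foldl (fun m code =>
      if (code.length : Int) ≠ code_len then m   -- Python: raise ValueError("Inconsistent ..."); excluded by Pre_
      else pvUpdMax m code) first
    maxima.map (· + 1)

-- ===== PORT B =====
def infer_vocab_sizes_alt (item_to_code : List (String × List Int)) : List Int :=
  let values := (PySem.Dict.ofList item_to_code).values
  if values.isEmpty then []   -- Python: raise ValueError("item_to_code is empty."); excluded by Pre_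
  else
    let code_len := (values.headD []).length
    if values.any (fun c => c.length ≠ code_len) then []  -- Python: raise ValueError; excluded by Pre_
    else
      -- code[i]: i < code_len = len(code) for every code here, so getD is exact
      (List.range code_len).map (fun i =>
        match PySem.List.max? (values.map (fun c => c.getD i 0)) (fun x => x) with
        | some m => m + 1
        | none => 0)

-- ===== PRECONDITION & SPEC =====
-- Pre_ excludes exactly the inputs where A raises ValueError: an empty dict, or dict values
-- (after Python's duplicate-key overwriting) of inconsistent lengths. B raises the same errors there.
def Pre_infer_vocab_sizes (item_to_code : List (String × List Int)) : Prop :=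
  (PySem.Dict.ofList item_to_code).values ≠ [] ∧
  ∀ c ∈ (PySem.Dict.ofList item_to_code).values,
    c.length = (((PySem.Dict.ofList item_to_code).values).headD []).length
instance (item_to_code : List (String × List Int)) : Decidable (Pre_infer_vocab_sizes item_to_code) := by unfold Pre_infer_vocab_sizes; infer_instance

def pvWitness_infer_vocab_sizes : (List (String × List Int)) := [("a", [1, 0]), ("b", [0, 2])]

def Spec_infer_vocab_sizes (item_to_code : List (String × List Int)) (out : List Int) : Prop := out = infer_vocab_sizes_alt item_to_code
instance (item_to_code : List (String × List Int)) (out : List Int) : Decidable (Spec_infer_vocab_sizes item_to_code out) := by unfold Spec_infer_vocab_sizes; infer_instance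

-- ===== CLAIM (what is proved, stated in full; the proofs are below) =====
def Claim_equal_infer_vocab_sizes : Prop := ∀ (item_to_code : List (String × List Int)), Dom_infer_vocab_sizes item_to_code → Pre_infer_vocab_sizes item_to_code → Spec_infer_vocab_sizes item_to_code (infer_vocab_sizes item_to_code)

-- ===== LEMMAS AND PROOFS =====

theorem pvUpdMax_length (m c : List Int) : (pvUpdMax m c).length = m.length := by
  induction m generalizing c with
  | nil => cases c <;> simp [pvUpdMax]
  | cons a m ih => cases c <;> simp [pvUpdMax, ih]

theorem pvUpdMax_getD (m c : List Int) (h : c.length = m.length) (i : Nat) :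
    (pvUpdMax m c).getD i 0 = max (m.getD i 0) (c.getD i 0) := by
  induction m generalizing c i with
  | nil =>
    cases c with
    | nil => simp [pvUpdMax]
    | cons v c => simp at h
  | cons a m ih =>
    cases c with
    | nil => simp at h
    | cons v c =>
      cases i with
      | zero => simp [pvUpdMax]
      | succ i => simpa [pvUpdMax] using ih c (by simpa using h) i

theorem foldA_invariant (L : Nat) (rest : List (List Int)) :
    ∀ m : List Int, m.length = L → (∀ c ∈ rest, c.length = L) →
    (rest.foldl (fun m code =>
        if (code.length : Int) ≠ (L : Int) then m else pvUpdMax m code) m).length = L ∧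
    ∀ i : Nat,
      (rest.foldl (fun m code =>
        if (code.length : Int) ≠ (L : Int) then m else pvUpdMax m code) m).getD i 0
        = (rest.map (fun c => c.getD i 0)).foldl max (m.getD i 0) := by
  induction rest with
  | nil => intro m hm _; exact ⟨hm, fun i => rfl⟩
  | cons c rest ih =>
    intro m hm hall
    have hc : c.length = L := hall c (List.mem_cons_self ..)
    have hstep : (if (c.length : Int) ≠ (L : Int) then m else pvUpdMax m c) = pvUpdMax m c := by
      simp [hc]
    have hlen : (pvUpdMax m c).length = L := by rw [pvUpdMax_length]; exact hm
    obtain ⟨h1, h2⟩ := ih (pvUpdMax m c) hlen (fun d hd => hall d (List.mem_cons_of_mem _ hd))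
    refine ⟨?_, fun i => ?_⟩
    · rw [List.foldl_cons, hstep]; exact h1
    · rw [List.foldl_cons, hstep, List.map_cons, List.foldl_cons,
        ← pvUpdMax_getD m c (by rw [hc, hm]) i]
      exact h2 i

theorem map_eq_range_map (xs : List Int) (f : Int → Int) :
    xs.map f = (List.range xs.length).map (fun i => f (xs.getD i 0)) := by
  apply List.ext_getElem
  · simp
  · intro i h1 h2
    simp at h1 h2 ⊢
    rw [List.getElem?_eq_getElem h2]
    rfl

-- ===== VERDICT (by name: the statement is the Claim_ definition above) =====
theorem infer_vocab_sizes_spec : Claim_equal_infer_vocab_sizes := by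
  intro itc _ hpre
  obtain ⟨hne, hlen⟩ := hpre
  unfold Spec_infer_vocab_sizes infer_vocab_sizes infer_vocab_sizes_alt
  cases hvals : (PySem.Dict.ofList itc).values with
  | nil => exact absurd hvals hne
  | cons first rest =>
    rw [hvals] at hlen
    have hall : ∀ c ∈ rest, c.length = first.length := by
      intro c hc
      simpa using hlen c (List.mem_cons_of_mem _ hc)
    simp only [List.isEmpty_cons, Bool.false_eq_true, if_false, List.headD_cons]
    rw [if_neg (by
      simp only [List.any_eq_true, not_exists, decide_eq_true_eq]
      push Not
      intro c hc
      rcases List.mem_cons.mp hc with h | h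
      · simp [h]
      · simp [hall c h])]
    obtain ⟨hL, hgetD⟩ := foldA_invariant first.length rest first rfl hall
    set maxima := rest.foldl (fun m code =>
      if (code.length : Int) ≠ (first.length : Int) then m else pvUpdMax m code) first with hmax
    rw [map_eq_range_map maxima (· + 1), hL]
    apply List.map_congr_left
    intro i hi
    rw [hgetD i]
    simp only [List.map_cons, PySem.List.max?_id_cons]
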